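-- pv_equiv track=rewrite | github.com/huizoo/algo | 프로그래머스/2/468379. 선인장 숨기기/선인장 숨기기.py | solution
-- ===== SOURCE A (Python) =====
-- from collections import deque
--
-- def solution(m, n, h, w, drops):
--     INF = 10**9
--
--     arr = [[INF] * n for _ in range(m)]
--
--     for idx, (i, j) in enumerate(drops, start=1):
--         arr[i][j] = idx
--
--     row = [[0] * (n-w+1) for _ in range(m)]
--
--     for i in range(m):
--         q = deque()
--
--         for j in range(n):
--             while q and arr[i][q[-1]] >= arr[i][j]:
--                 q.pop()
--             q.append(j)
--
--             if q[0] <= j-w: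
--                 q.popleft()
--
--             if j >= w-1:
--                 row[i][j-w+1] = arr[i][q[0]]
--
--     score = [[0] * (n-w+1) for _ in range(m-h+1)]
--
--     for j in range(n-w+1):
--         q = deque()
--
--         for i in range(m):
--             while q and row[q[-1]][j] >= row[i][j]:
--                 q.pop()
--             q.append(i)
--
--             if q[0] <= i-h:
--                 q.popleft()
--
--             if i >= h-1:
--                 x = i-h+1
--                 score[x][j] = row[q[0]][j]
--
--     best = -1
--     answer = [0, 0]
--
--     for i in range(m-h+1):
--         for j in range(n-w+1):
--             if score[i][j] > best:
--                 best = score[i][j]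
--                 answer = [i, j]
--
--     return answer
-- ===== SOURCE B (Python) =====
-- def solution(m, n, h, w, drops):
--     INF = 10**9
--     arr = [[INF] * n for _ in range(m)]
--     for idx, (i, j) in enumerate(drops, start=1):
--         arr[i][j] = idx
--     best = -1
--     answer = [0, 0]
--     for x in range(m - h + 1):
--         for y in range(n - w + 1):
--             mn = min(min(r[y:y + w]) for r in arr[x:x + h])
--             if mn > best:
--                 best = mn
--                 answer = [x, y]
--     return answer
-- ===== Notes on version B (the rewrite author's own statement) =====
-- stated objective: simpler
-- what changed: B drops A's two monotone-deque sliding-minimum passes (rows then columns) and instead computes each h-by-w window's minimum directly with min() over slices, keeping A's row-major scan and strict '>' update so the first maximal window wins.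
-- outside the precondition, e.g. on solution(1, 0, 1, 0, []): A returns [0, 0], B raises ValueError; on solution(0, 3, 0, 1, []): A returns [0, 0], B raises ValueError
import Mathlib
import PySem

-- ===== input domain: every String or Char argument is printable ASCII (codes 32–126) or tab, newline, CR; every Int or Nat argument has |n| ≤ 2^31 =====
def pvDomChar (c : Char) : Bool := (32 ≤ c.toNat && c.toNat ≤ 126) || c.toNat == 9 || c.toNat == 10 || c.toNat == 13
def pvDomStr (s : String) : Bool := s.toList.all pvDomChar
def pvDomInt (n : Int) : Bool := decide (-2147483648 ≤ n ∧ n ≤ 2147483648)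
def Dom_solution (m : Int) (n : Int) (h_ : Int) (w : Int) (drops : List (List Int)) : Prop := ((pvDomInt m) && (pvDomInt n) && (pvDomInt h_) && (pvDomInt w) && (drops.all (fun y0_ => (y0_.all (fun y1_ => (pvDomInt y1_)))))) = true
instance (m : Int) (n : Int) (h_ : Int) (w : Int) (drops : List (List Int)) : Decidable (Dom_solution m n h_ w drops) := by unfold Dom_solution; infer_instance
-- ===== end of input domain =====

-- B replaces A's two monotone-deque sliding-minimum passes by a direct per-window
-- minimum (min over each h×w window), same scan order and strict-'>' tie-breaking:
-- objective 'simpler' (B is shorter and plainer; asymptotically slower, which is stated honestly).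

-- ===== PORT A =====
def pvINF : Int := 10 ^ 9

-- shared by both ports: both Pythons build `arr` with the identical first loop
-- (1-based enumerate of drops written into an INF-filled m×n grid, Python index semantics)
def pvGrid (m : Int) (n : Int) (drops : List (List Int)) : List (List Int) :=
  (drops.foldl
    (fun (st : Int × List (List Int)) d =>
      let i := PySem.List.pyGetD d 0 0
      let j := PySem.List.pyGetD d 1 0
      (st.1 + 1,
       PySem.List.pySetD st.2 i (PySem.List.pySetD (PySem.List.pyGetD st.2 i []) j st.1)))
    (1, List.replicate m.toNat (List.replicate n.toNat pvINF))).2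

-- `while q and arr-val[q[-1]] >= arr-val[j]: q.pop()`; the deque is stored reversed (head = back)
def pvShrink (f : Nat → Int) (x : Nat) : List Nat → List Nat
  | [] => []
  | t :: rest => if f x ≤ f t then pvShrink f x rest else t :: rest

-- one iteration of A's sliding-minimum inner loop (push, popleft check, window write)
def pvStep (f : Nat → Int) (w : Int) (st : List Nat × List Int) (j : Nat) : List Nat × List Int :=
  let q1 := j :: pvShrink f j st.1
  let q2 := if (q1.getLastD 0 : Int) ≤ (j : Int) - w then q1.dropLast else q1
  let out := if (j : Int) ≥ w - 1 then st.2.set ((j : Int) - w + 1).toNat (f (q2.getLastD 0)) else st.2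
  (q2, out)

-- A's whole deque pass along one line of `len` output cells (used for rows, then columns)
def pvSlide (f : Nat → Int) (nn : Nat) (w : Int) (len : Nat) : List Int :=
  ((List.range nn).foldl (pvStep f w) ([], List.replicate len 0)).2

def solution (m : Int) (n : Int) (h_ : Int) (w : Int) (drops : List (List Int)) : List Int :=
  let arr := pvGrid m n drops
  let row := (List.range m.toNat).map
    (fun i => pvSlide (fun t => (arr.getD i []).getD t 0) n.toNat w (n - w + 1).toNat)
  -- Python's `score` filled column by column; stored here column-major: score[j] is column j
  let score := (List.range (n - w + 1).toNat).map
    (fun j => pvSlide (fun t => (row.getD t []).getD j 0) m.toNat h_ (m - h_ + 1).toNat)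
  ((List.range (m - h_ + 1).toNat).foldl
    (fun (st : Int × List Int) i =>
      (List.range (n - w + 1).toNat).foldl
        (fun (st : Int × List Int) j =>
          let s := (score.getD j []).getD i 0
          if s > st.1 then (s, [(i : Int), (j : Int)]) else st) st)
    (-1, [0, 0])).2

-- ===== PORT B =====
-- min(r[y:y+w])
def pvRowMin (r : List Int) (y : Int) (w : Int) : Int :=
  (PySem.List.min? (PySem.List.slice r (some y) (some (y + w))) (fun v => v)).getD 0

def solution_alt (m : Int) (n : Int) (h_ : Int) (w : Int) (drops : List (List Int)) : List Int :=
  let arr := pvGrid m n drops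
  ((List.range (m - h_ + 1).toNat).foldl
    (fun (st : Int × List Int) (x : Nat) =>
      (List.range (n - w + 1).toNat).foldl
        (fun (st : Int × List Int) (y : Nat) =>
          let mn := (PySem.List.min?
            ((PySem.List.slice arr (some (x : Int)) (some ((x : Int) + h_))).map
              (fun r => pvRowMin r (y : Int) w)) (fun v => v)).getD 0
          if mn > st.1 then (mn, [(x : Int), (y : Int)]) else st) st)
    (-1, [0, 0])).2

-- ===== PRECONDITION & SPEC =====
-- Pre_ admits exactly the inputs on which BOTH programs return: it excludes the inputs
-- where A raises (a drop not of length 2 or indexing outside the grid; w ≤ 0 with a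
-- nonempty grid, or h_ ≤ 0 with rows to scan — IndexError on the emptied deque), and the
-- remaining degenerate h_ ≤ 0 / w ≤ 0 shapes where A's [0,0] falls out of zero-filled
-- scores but B's min() over an empty window raises.
def Pre_solution (m : Int) (n : Int) (h_ : Int) (w : Int) (drops : List (List Int)) : Prop :=
  (∀ d ∈ drops, d.length = 2 ∧
    (-m ≤ d.getD 0 0 ∧ d.getD 0 0 < m) ∧ (-n ≤ d.getD 1 0 ∧ d.getD 1 0 < n)) ∧
  (¬ (w ≤ 0 ∧ 1 ≤ m ∧ 1 ≤ n)) ∧ (¬ (h_ ≤ 0 ∧ 1 ≤ m ∧ 1 ≤ n - w + 1)) ∧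
  ((1 ≤ h_ ∧ 1 ≤ w) ∨ m - h_ + 1 ≤ 0 ∨ n - w + 1 ≤ 0)
instance (m : Int) (n : Int) (h_ : Int) (w : Int) (drops : List (List Int)) : Decidable (Pre_solution m n h_ w drops) := by unfold Pre_solution; infer_instance

def pvWitness_solution : Int × Int × Int × Int × List (List Int) := (2, 2, 1, 2, [[0, 1], [1, 0]])

def Spec_solution (m : Int) (n : Int) (h_ : Int) (w : Int) (drops : List (List Int)) (out : List Int) : Prop := out = solution_alt m n h_ w drops
instance (m : Int) (n : Int) (h_ : Int) (w : Int) (drops : List (List Int)) (out : List Int) : Decidable (Spec_solution m n h_ w drops out) := by unfold Spec_solution; infer_instance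

-- ===== CLAIM (what is proved, stated in full; the proofs are below) =====
def Claim_equal_solution : Prop := ∀ (m : Int) (n : Int) (h_ : Int) (w : Int) (drops : List (List Int)), Dom_solution m n h_ w drops → Pre_solution m n h_ w drops → Spec_solution m n h_ w drops (solution m n h_ w drops)

-- ===== LEMMAS AND PROOFS =====

-- the monotone-deque invariant: stored head = Python's deque back, stored last = its front
def pvInv (f : Nat → Int) (w : Int) (j : Nat) (q : List Nat) : Prop :=
  (∃ r, q = j :: r) ∧
  q.Pairwise (fun a b => b < a ∧ f b < f a) ∧
  (∀ t ∈ q, (j : Int) - w < (t : Int)) ∧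
  (∀ t : Nat, (j : Int) - w < (t : Int) → t ≤ j → ∃ s ∈ q, t ≤ s ∧ f s ≤ f t)

theorem pvShrink_suffix (f : Nat → Int) (x : Nat) (q : List Nat) : (pvShrink f x q).IsSuffix q := by
  induction q with
  | nil => simp [pvShrink]
  | cons t rest ih =>
    by_cases h : f x ≤ f t
    · simpa [pvShrink, h] using ih.trans (List.suffix_cons t rest)
    · simp [pvShrink, h]

theorem pvShrink_popped (f : Nat → Int) (x : Nat) (q : List Nat) :
    ∀ t ∈ q, t ∈ pvShrink f x q ∨ f x ≤ f t := by
  induction q with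
  | nil => simp
  | cons a rest ih =>
    intro t ht
    by_cases h : f x ≤ f a
    · rcases List.mem_cons.1 ht with rfl | ht
      · exact Or.inr h
      · simpa [pvShrink, h] using ih t ht
    · simp [pvShrink, h, ht]

theorem pvShrink_lt (f : Nat → Int) (x : Nat) (q : List Nat)
    (hp : q.Pairwise (fun a b => b < a ∧ f b < f a)) :
    ∀ t ∈ pvShrink f x q, f t < f x := by
  induction q with
  | nil => simp [pvShrink]
  | cons a rest ih =>
    intro t ht
    by_cases h : f x ≤ f a
    · exact ih (List.Pairwise.of_cons hp) t (by simpa [pvShrink, h] using ht)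
    · rw [pvShrink, if_neg h] at ht
      rcases List.mem_cons.1 ht with rfl | ht
      · omega
      · have := (List.pairwise_cons.1 hp).1 t ht
        omega

theorem getLastD_mem {α : Type} (l : List α) (d : α) (h : l ≠ []) : l.getLastD d ∈ l := by
  induction l with
  | nil => simp at h
  | cons a t ih =>
    cases t with
    | nil => simp
    | cons b s => simpa using Or.inr (ih (by simp))

theorem pairwise_getLastD {α : Type} (R : α → α → Prop) (l : List α) (d : α)
    (hp : l.Pairwise R) : ∀ a ∈ l, a = l.getLastD d ∨ R a (l.getLastD d) := by
  induction l with
  | nil => simp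
  | cons a t ih =>
    intro b hb
    cases t with
    | nil => simp at hb; exact Or.inl (by simpa using hb)
    | cons c s =>
      rcases List.mem_cons.1 hb with rfl | hb
      · right
        have hmem : (c :: s).getLastD d ∈ c :: s := getLastD_mem _ d (by simp)
        simpa using (List.pairwise_cons.1 hp).1 _ hmem
      · simpa using ih (List.Pairwise.of_cons hp) b hb

theorem pairwise_dropLast_rel {α : Type} (R : α → α → Prop) (l : List α) (d : α)
    (hp : l.Pairwise R) : ∀ a ∈ l.dropLast, R a (l.getLastD d) := by
  induction l with
  | nil => simp
  | cons a t ih =>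
    cases t with
    | nil => simp
    | cons c s =>
      intro b hb
      rcases List.mem_cons.1 (by simpa using hb) with rfl | hb
      · have hmem : (c :: s).getLastD d ∈ c :: s := getLastD_mem _ d (by simp)
        simpa using (List.pairwise_cons.1 hp).1 _ hmem
      · simpa using ih (List.Pairwise.of_cons hp) b hb

theorem mem_dropLast_or {α : Type} (l : List α) (d : α) (a : α) (ha : a ∈ l) :
    a ∈ l.dropLast ∨ a = l.getLastD d := by
  induction l with
  | nil => simp at ha
  | cons b t ih =>
    cases t with
    | nil => simp at ha ⊢; simpa using ha
    | cons c s =>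
      rcases List.mem_cons.1 ha with rfl | ha
      · left; simp
      · rcases ih ha with h | h
        · left; simpa using Or.inr h
        · right; simpa using h

theorem pvInv_step (f : Nat → Int) (w : Int) (hw : 1 ≤ w) (x : Nat) (q : List Nat)
    (out0 : List Int)
    (hI : x = 0 ∧ q = [] ∨ 0 < x ∧ pvInv f w (x - 1) q) :
    pvInv f w x ((pvStep f w (q, out0) x).1) := by
  rcases hI with ⟨rfl, rfl⟩ | ⟨hx, hInv⟩
  · have h0 : (([0] : List Nat).getLastD 0) = 0 := rfl
    have hbr : ¬ (((([0] : List Nat).getLastD 0 : Nat) : Int) ≤ (0 : Int) - w) := by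
      rw [h0]; push_cast; omega
    have hstep : (pvStep f w (([] : List Nat), out0) 0).1 = [0] := by
      simp only [pvStep, pvShrink]
      rw [if_neg (by rw [h0]; push_cast; omega)]
    rw [hstep]
    refine ⟨⟨[], rfl⟩, by simp, ?_, ?_⟩
    · intro t ht; simp at ht; subst ht; push_cast; omega
    · intro t h1 h2
      have ht0 : t = 0 := by omega
      subst ht0
      exact ⟨0, by simp, le_rfl, le_rfl⟩
  · obtain ⟨⟨r, hq⟩, hpw, hwin, hP3⟩ := hInv
    set j := x - 1 with hj
    have hxj : x = j + 1 := by omega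
    have hlej : ∀ t ∈ q, t ≤ j := by
      intro t ht
      rw [hq] at ht hpw
      rcases List.mem_cons.1 ht with rfl | ht
      · exact le_rfl
      · exact le_of_lt ((List.pairwise_cons.1 hpw).1 t ht).1
    set s := pvShrink f x q with hs
    have hsmem : ∀ t ∈ s, t ∈ q := fun t ht => (pvShrink_suffix f x q).sublist.mem ht
    have hps : s.Pairwise (fun a b => b < a ∧ f b < f a) :=
      List.Pairwise.sublist (pvShrink_suffix f x q).sublist hpw
    have hfs : ∀ t ∈ s, f t < f x := pvShrink_lt f x q hpw
    set q1 := x :: s with hq1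
    have hq1pw : q1.Pairwise (fun a b => b < a ∧ f b < f a) := by
      refine List.pairwise_cons.2 ⟨fun t ht => ⟨?_, hfs t ht⟩, hps⟩
      exact lt_of_le_of_lt (hlej t (hsmem t ht)) (by omega)
    have hq1ge : ∀ t ∈ q1, ((x : Int) - w) ≤ (t : Int) := by
      intro t ht
      rcases List.mem_cons.1 ht with rfl | ht
      · omega
      · have := hwin t (hsmem t ht)
        omega
    have hlast1 := getLastD_mem q1 0 (by simp [hq1])
    by_cases hbr : ((q1.getLastD 0 : Nat) : Int) ≤ (x : Int) - w
    · -- popleft fires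
      have hsne : s ≠ [] := by
        intro hnil
        rw [hq1, hnil] at hbr
        have : (([x] : List Nat).getLastD 0) = x := rfl
        rw [this] at hbr; omega
      obtain ⟨c, s', hcs⟩ := List.exists_cons_of_ne_nil hsne
      have hdrop : q1.dropLast = x :: (c :: s').dropLast := by
        rw [hq1, hcs]; rfl
      have hstep : (pvStep f w (q, out0) x).1 = q1.dropLast := by
        simp only [pvStep, ← hs, ← hq1, if_pos hbr]
      rw [hstep]
      have hxq2 : x ∈ q1.dropLast := by rw [hdrop]; exact List.mem_cons_self
      have hq2win : ∀ t ∈ q1.dropLast, (x : Int) - w < (t : Int) := by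
        intro t ht
        have h1 := pairwise_dropLast_rel _ q1 0 hq1pw t ht
        have h2 := hq1ge _ hlast1
        omega
      refine ⟨⟨(c :: s').dropLast, hdrop⟩, List.Pairwise.sublist (List.dropLast_sublist q1) hq1pw, hq2win, ?_⟩
      intro t hlo hhi
      by_cases htx : t = x
      · exact ⟨x, hxq2, by omega, by rw [htx]⟩
      · obtain ⟨s0, hs0q, hts0, hfs0⟩ := hP3 t (by omega) (by omega)
        rcases pvShrink_popped f x q s0 hs0q with hin | hpop
        · have hs0q1 : s0 ∈ q1 := List.mem_cons_of_mem _ (hs ▸ hin)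
          rcases mem_dropLast_or q1 0 s0 hs0q1 with h | h
          · exact ⟨s0, h, hts0, hfs0⟩
          · exfalso
            have : ((s0 : Nat) : Int) ≤ (x : Int) - w := by rw [h]; exact hbr
            omega
        · exact ⟨x, hxq2, by omega, le_trans hpop hfs0⟩
    · -- no popleft
      have hstep : (pvStep f w (q, out0) x).1 = q1 := by
        simp only [pvStep, ← hs, ← hq1, if_neg hbr]
      rw [hstep]
      have hq2win : ∀ t ∈ q1, (x : Int) - w < (t : Int) := by
        intro t ht
        rcases pairwise_getLastD _ q1 0 hq1pw t ht with h | h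
        · rw [h]; omega
        · have := hq1ge _ hlast1
          omega
      refine ⟨⟨s, rfl⟩, hq1pw, hq2win, ?_⟩
      intro t hlo hhi
      by_cases htx : t = x
      · exact ⟨x, List.mem_cons_self, by omega, by rw [htx]⟩
      · obtain ⟨s0, hs0q, hts0, hfs0⟩ := hP3 t (by omega) (by omega)
        rcases pvShrink_popped f x q s0 hs0q with hin | hpop
        · exact ⟨s0, List.mem_cons_of_mem _ (hs ▸ hin), hts0, hfs0⟩
        · exact ⟨x, List.mem_cons_self, by omega, le_trans hpop hfs0⟩

def pvWMin (f : Nat → Int) (lo : Nat) (wn : Nat) : Int :=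
  ((List.range wn).map (fun k => f (lo + k))).foldl min (f lo)

theorem foldl_min_le_init (l : List Int) (a : Int) : l.foldl min a ≤ a := by
  induction l generalizing a with
  | nil => simp
  | cons b t ih => exact le_trans (ih (min a b)) (min_le_left a b)

theorem foldl_min_le_mem (l : List Int) (a x : Int) (hx : x ∈ l) : l.foldl min a ≤ x := by
  induction l generalizing a with
  | nil => simp at hx
  | cons b t ih =>
    rcases List.mem_cons.1 hx with rfl | hx
    · exact le_trans (foldl_min_le_init t (min a x)) (min_le_right a x)
    · exact ih (min a b) hx

theorem foldl_min_eq_or (l : List Int) (a : Int) : l.foldl min a = a ∨ l.foldl min a ∈ l := by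
  induction l generalizing a with
  | nil => left; rfl
  | cons b t ih =>
    have hl : List.foldl min a (b :: t) = List.foldl min (min a b) t := rfl
    rw [hl]
    rcases ih (min a b) with h | h
    · rcases min_cases a b with ⟨h2, _⟩ | ⟨h2, _⟩
      · left; rw [h, h2]
      · right; rw [h, h2]; exact List.mem_cons_self
    · right; exact List.mem_cons_of_mem _ h

theorem pvWMin_le (f : Nat → Int) (lo wn k : Nat) (hk : k < wn) : pvWMin f lo wn ≤ f (lo + k) :=
  foldl_min_le_mem _ _ _ (List.mem_map.2 ⟨k, List.mem_range.2 hk, rfl⟩)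

theorem pvWMin_exists (f : Nat → Int) (lo wn : Nat) :
    ∃ k, (k = 0 ∨ k < wn) ∧ pvWMin f lo wn = f (lo + k) := by
  rcases foldl_min_eq_or ((List.range wn).map (fun k => f (lo + k))) (f lo) with h | h
  · exact ⟨0, Or.inl rfl, by simpa [pvWMin] using h⟩
  · rcases List.mem_map.1 h with ⟨k, hk, hv⟩
    exact ⟨k, Or.inr (List.mem_range.1 hk), hv.symm⟩

theorem pvInv_front (f : Nat → Int) (w : Int) (hw : 1 ≤ w) (j : Nat) (q : List Nat)
    (hI : pvInv f w j q) (hjw : w.toNat ≤ j + 1) :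
    f (q.getLastD 0) = pvWMin f (j + 1 - w.toNat) w.toNat := by
  obtain ⟨⟨r, hq⟩, hpw, hwin, hP3⟩ := hI
  have hne : q ≠ [] := by rw [hq]; simp
  have hwcast : ((w.toNat : Nat) : Int) = w := Int.toNat_of_nonneg (by omega)
  set wn := w.toNat with hwn
  set lo := j + 1 - wn with hlo
  have hwn1 : 1 ≤ wn := by omega
  have hfrmem : q.getLastD 0 ∈ q := getLastD_mem q 0 hne
  set fr := q.getLastD 0 with hfr
  have hlej : ∀ t ∈ q, t ≤ j := by
    intro t ht
    rw [hq] at ht hpw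
    rcases List.mem_cons.1 ht with rfl | ht
    · exact le_rfl
    · exact le_of_lt ((List.pairwise_cons.1 hpw).1 t ht).1
  have hmin : ∀ s ∈ q, f fr ≤ f s := by
    intro s hs
    rcases pairwise_getLastD _ q 0 hpw s hs with h | h
    · rw [h]
    · exact le_of_lt h.2
  have hfrlo : lo ≤ fr := by
    have := hwin fr hfrmem
    omega
  have hfrj : fr ≤ j := hlej fr hfrmem
  apply le_antisymm
  · -- f fr ≤ pvWMin
    obtain ⟨k, hk, hval⟩ := pvWMin_exists f lo wn
    have hkwn : k < wn := by rcases hk with rfl | h; omega; exact h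
    set t := lo + k with ht
    have htwin1 : (j : Int) - w < (t : Int) := by
      have : (lo : Int) = (j : Int) + 1 - w := by omega
      omega
    have htwin2 : t ≤ j := by omega
    obtain ⟨s0, hs0q, hts0, hfs0⟩ := hP3 t htwin1 htwin2
    rw [hval]
    exact le_trans (hmin s0 hs0q) hfs0
  · -- pvWMin ≤ f fr
    have := pvWMin_le f lo wn (fr - lo) (by omega)
    have heq : lo + (fr - lo) = fr := by omega
    rwa [heq] at this

theorem pvStep_snd (f : Nat → Int) (w : Int) (st : List Nat × List Int) (j : Nat) :
    (pvStep f w st j).2 = if (j : Int) ≥ w - 1 then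
      st.2.set ((j : Int) - w + 1).toNat (f ((pvStep f w st j).1.getLastD 0)) else st.2 := rfl

theorem pvSlide_state (f : Nat → Int) (w : Int) (hw : 1 ≤ w) (len : Nat) (k : Nat) :
    (0 < k → pvInv f w (k - 1) (((List.range k).foldl (pvStep f w) ([], List.replicate len 0)).1)) ∧
    (((List.range k).foldl (pvStep f w) ([], List.replicate len 0)).2.length = len) ∧
    (∀ p, p < len → p + w.toNat ≤ k →
      (((List.range k).foldl (pvStep f w) ([], List.replicate len 0)).2.getD p 0 = pvWMin f p w.toNat)) := by
  have hwn1 : 1 ≤ w.toNat := by omega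
  induction k with
  | zero =>
    refine ⟨by omega, by simp, ?_⟩
    intro p hp hpk; omega
  | succ k ih =>
    obtain ⟨ihq, ihlen, ihval⟩ := ih
    set st := ((List.range k).foldl (pvStep f w) ([], List.replicate len 0)) with hst
    have hunf : ((List.range (k+1)).foldl (pvStep f w) ([], List.replicate len 0)) = pvStep f w st k := by
      rw [List.range_succ, List.foldl_append, List.foldl_cons, List.foldl_nil]
    have hIq : pvInv f w k ((pvStep f w st k).1) := by
      rcases Nat.eq_zero_or_pos k with rfl | hk
      · have h1 : st.1 = [] := by
          rw [hst]; simp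
        have := pvInv_step f w hw 0 st.1 st.2 (Or.inl ⟨rfl, h1⟩)
        simpa using this
      · have := pvInv_step f w hw k st.1 st.2 (Or.inr ⟨hk, ihq hk⟩)
        simpa using this
    refine ⟨fun _ => by rw [hunf]; simpa using hIq, ?_, ?_⟩
    · rw [hunf, pvStep_snd]
      split
      · simpa using ihlen
      · exact ihlen
    · intro p hp hpk
      rw [hunf, pvStep_snd]
      by_cases hbr : (k : Int) ≥ w - 1
      · rw [if_pos hbr]
        have hwk : w.toNat ≤ k + 1 := by omega
        have hp0 : ((k : Int) - w + 1).toNat = k + 1 - w.toNat := by omega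
        by_cases hpe : p = k + 1 - w.toNat
        · -- freshly written cell
          subst hpe
          rw [hp0]
          have hfr := pvInv_front f w hw k ((pvStep f w st k).1) hIq hwk
          rw [List.getD_eq_getElem?_getD, List.getElem?_set_self (by rw [ihlen]; omega),
            Option.getD_some, hfr]
        · have hplt : p + w.toNat ≤ k := by omega
          rw [List.getD_eq_getElem?_getD, List.getElem?_set_ne (by omega),
            ← List.getD_eq_getElem?_getD]
          exact ihval p hp hplt
      · rw [if_neg hbr]
        exact ihval p hp (by omega)

theorem pvSlide_len (f : Nat → Int) (nn : Nat) (w : Int) (hw : 1 ≤ w) (len : Nat) :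
    (pvSlide f nn w len).length = len := (pvSlide_state f w hw len nn).2.1

theorem pvSlide_eq (f : Nat → Int) (nn : Nat) (w : Int) (hw : 1 ≤ w) (len : Nat)
    (hlen : len + w.toNat = nn + 1) :
    pvSlide f nn w len = (List.range len).map (fun p => pvWMin f p w.toNat) := by
  apply List.ext_getElem
  · rw [pvSlide_len f nn w hw len]; simp
  · intro i h1 h2
    rw [pvSlide_len f nn w hw len] at h1
    have hval := (pvSlide_state f w hw len nn).2.2 i h1 (by omega)
    have : (pvSlide f nn w len)[i] = (pvSlide f nn w len).getD i 0 := by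
      rw [List.getD_eq_getElem?_getD, List.getElem?_eq_getElem (by rw [pvSlide_len f nn w hw len]; omega)]
      rfl
    rw [this]
    unfold pvSlide at hval ⊢
    rw [hval]
    simp

theorem pvWMin_shift (f : Nat → Int) (lo wn : Nat) :
    pvWMin f lo wn = pvWMin (fun k => f (lo + k)) 0 wn := by
  simp [pvWMin]

theorem pvWMin_congr (F G : Nat → Int) (c : Nat) (h : ∀ k, k < c ∨ k = 0 → F k = G k) :
    pvWMin F 0 c = pvWMin G 0 c := by
  unfold pvWMin
  rw [h 0 (Or.inr rfl)]
  congr 1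
  apply List.map_congr_left
  intro k hk
  simp only [Nat.zero_add]
  exact h k (Or.inl (List.mem_range.1 hk))

theorem foldl_congr_mem' {α β : Type} (l : List α) (f g : β → α → β) (a : β)
    (h : ∀ b, ∀ x ∈ l, f b x = g b x) : l.foldl f a = l.foldl g a := by
  induction l generalizing a with
  | nil => rfl
  | cons x t ih =>
    rw [List.foldl_cons, List.foldl_cons, h a x List.mem_cons_self]
    exact ih _ (fun b y hy => h b y (List.mem_cons_of_mem _ hy))

theorem pyIdx?_lt (nn : Nat) (i : Int) (k : Nat) (h : PySem.List.pyIdx? nn i = some k) : k < nn := by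
  unfold PySem.List.pyIdx? at h
  split_ifs at h <;> simp at h <;> omega

theorem drop_take_eq_map {α : Type} [Inhabited α] (l : List α) (x k : Nat) (hk : x + k ≤ l.length) :
    (l.drop x).take k = (List.range k).map (fun t => l.getD (x + t) default) := by
  apply List.ext_getElem
  · simp; omega
  · intro i h1 h2
    simp only [List.getElem_take, List.getElem_drop, List.getElem_map, List.getElem_range]
    rw [List.getD_eq_getElem?_getD, List.getElem?_eq_getElem (by simp at h1; omega)]
    rfl

theorem foldl_min_dup (a : Int) (t : List Int) : (a :: t).foldl min a = t.foldl min a := by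
  simp [List.foldl]

theorem min?_map_range (g : Nat → Int) (c : Nat) (hc : 1 ≤ c) :
    (PySem.List.min? ((List.range c).map g) (fun v => v)).getD 0
      = ((List.range c).map g).foldl min (g 0) := by
  obtain ⟨k, rfl⟩ : ∃ k, c = k + 1 := ⟨c - 1, by omega⟩
  rw [List.range_succ_eq_map]
  rw [List.map_cons, PySem.List.min?_id_cons, Option.getD_some]
  have := foldl_min_dup (g 0) ((List.range k).map Nat.succ |>.map g)
  simpa using this.symm

theorem min_segment (l : List Int) (x : Int) (c : Int) (hx : 0 ≤ x) (hc : 1 ≤ c)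
    (hlen : x.toNat + c.toNat ≤ l.length) :
    (PySem.List.min? (PySem.List.slice l (some x) (some (x + c))) (fun v => v)).getD 0
      = pvWMin (fun t => l.getD t 0) x.toNat c.toNat := by
  rw [PySem.List.slice_toNat l hx (by omega : (0:Int) ≤ x + c)]
  have h1 : (x + c).toNat - x.toNat = c.toNat := by omega
  rw [h1, drop_take_eq_map l x.toNat c.toNat hlen]
  rw [min?_map_range _ c.toNat (by omega)]
  rw [pvWMin_shift]
  unfold pvWMin
  simp

theorem pySetD_cases {α : Type} [Inhabited α] (xs : List α) (i : Int) (v : α) :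
    PySem.List.pySetD xs i v = xs ∨
    ∃ k, k < xs.length ∧ PySem.List.pySetD xs i v = xs.set k v ∧
      PySem.List.pyGetD xs i (default : α) = xs.getD k default := by
  unfold PySem.List.pySetD PySem.List.pySet? PySem.List.pyGetD PySem.List.pyGet?
  cases h : PySem.List.pyIdx? xs.length i with
  | none => left; simp [h]
  | some k =>
    right
    have hk := pyIdx?_lt xs.length i k h
    refine ⟨k, hk, by simp [h], ?_⟩
    simp [h, List.getElem?_eq_getElem hk, List.getD_eq_getElem?_getD]

theorem pvGrid_shape (m n : Int) (drops : List (List Int)) :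
    (pvGrid m n drops).length = m.toNat ∧ ∀ r ∈ pvGrid m n drops, r.length = n.toNat := by
  have main : ∀ (ds : List (List Int)) (st : Int × List (List Int)),
      (st.2.length = m.toNat ∧ ∀ r ∈ st.2, r.length = n.toNat) →
      (((ds.foldl
        (fun (st : Int × List (List Int)) d =>
          let i := PySem.List.pyGetD d 0 0
          let j := PySem.List.pyGetD d 1 0
          (st.1 + 1,
           PySem.List.pySetD st.2 i (PySem.List.pySetD (PySem.List.pyGetD st.2 i []) j st.1)))
        st)).2.length = m.toNat ∧
       ∀ r ∈ ((ds.foldl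
        (fun (st : Int × List (List Int)) d =>
          let i := PySem.List.pyGetD d 0 0
          let j := PySem.List.pyGetD d 1 0
          (st.1 + 1,
           PySem.List.pySetD st.2 i (PySem.List.pySetD (PySem.List.pyGetD st.2 i []) j st.1)))
        st)).2, r.length = n.toNat) := by
    intro ds
    induction ds with
    | nil => exact fun st h => h
    | cons d t ih =>
      intro st hst
      rw [List.foldl_cons]
      apply ih
      constructor
      · simp only [PySem.List.length_pySetD]
        exact hst.1
      · intro r hr
        simp only at hr
        rcases pySetD_cases st.2 (PySem.List.pyGetD d 0 0)
            (PySem.List.pySetD (PySem.List.pyGetD st.2 (PySem.List.pyGetD d 0 0) []) (PySem.List.pyGetD d 1 0) st.1)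
          with hcase | ⟨k, hk, hset, hget⟩
        · rw [hcase] at hr
          exact hst.2 r hr
        · rw [hset] at hr
          rcases List.mem_or_eq_of_mem_set hr with h | h
          · exact hst.2 r h
          · subst h
            rw [PySem.List.length_pySetD]
            have hd : (default : List Int) = [] := rfl
            rw [← hd, hget, List.getD_eq_getElem?_getD, List.getElem?_eq_getElem hk]
            exact hst.2 _ (List.getElem_mem hk)
  apply main
  constructor
  · simp
  · intro r hr
    rw [List.eq_of_mem_replicate hr]
    simp

-- pointwise equality of the two window scores
theorem getD_map_range {β : Type} (g : Nat → β) (N p : Nat) (d : β) (hp : p < N) :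
    ((List.range N).map g).getD p d = g p := by
  rw [List.getD_eq_getElem?_getD, List.getElem?_map, List.getElem?_range hp]
  rfl

-- pointwise equality of the two window scores
theorem score_pointwise (m n h_ w : Int) (drops : List (List Int))
    (hh : 1 ≤ h_) (hw : 1 ≤ w) (i j : Nat)
    (hi : i < (m - h_ + 1).toNat) (hj : j < (n - w + 1).toNat) :
    ((((List.range (n - w + 1).toNat).map
        (fun j => pvSlide (fun t => ((((List.range m.toNat).map
          (fun i => pvSlide (fun t => ((pvGrid m n drops).getD i []).getD t 0) n.toNat w (n - w + 1).toNat)).getD t []).getD j 0))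
          m.toNat h_ (m - h_ + 1).toNat)).getD j []).getD i 0)
    = (PySem.List.min?
        ((PySem.List.slice (pvGrid m n drops) (some (i : Int)) (some ((i : Int) + h_))).map
          (fun r => pvRowMin r (j : Int) w)) (fun v => v)).getD 0 := by
  obtain ⟨hgl, hgr⟩ := pvGrid_shape m n drops
  set arr := pvGrid m n drops with harr
  have hM : (m - h_ + 1).toNat + h_.toNat = m.toNat + 1 := by omega
  have hN : (n - w + 1).toNat + w.toNat = n.toNat + 1 := by omega
  have hihn : i + h_.toNat ≤ m.toNat := by omega
  have hjwn : j + w.toNat ≤ n.toNat := by omega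
  have hrowlen : ∀ k, k < m.toNat → (arr.getD k []).length = n.toNat := by
    intro k hk
    rw [List.getD_eq_getElem?_getD, List.getElem?_eq_getElem (by omega : k < arr.length)]
    exact hgr _ (List.getElem_mem (by omega))
  -- the left-hand side
  rw [getD_map_range _ _ _ _ hj,
    pvSlide_eq _ m.toNat h_ hh _ hM,
    getD_map_range _ _ _ _ hi,
    pvWMin_shift]
  -- the right-hand side
  rw [PySem.List.slice_toNat arr (by omega : (0:Int) ≤ (i:Int)) (by omega : (0:Int) ≤ (i:Int) + h_)]
  have hseg : ((i : Int) + h_).toNat - ((i : Int)).toNat = h_.toNat := by omega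
  have hdflt : (default : List Int) = [] := rfl
  rw [hseg, Int.toNat_natCast,
    drop_take_eq_map arr i h_.toNat (by omega), List.map_map,
    min?_map_range _ h_.toNat (by omega)]
  have hR : ∀ (G : Nat → Int), ((List.range h_.toNat).map G).foldl min (G 0) = pvWMin G 0 h_.toNat := by
    intro G
    unfold pvWMin
    simp
  rw [show ((fun r => pvRowMin r (j : Int) w) ∘ fun t => arr.getD (i + t) default)
      = fun k => pvRowMin (arr.getD (i + k) []) (j : Int) w from by
    funext k
    simp [hdflt]]
  rw [hR (fun k => pvRowMin (arr.getD (i + k) []) (j : Int) w)]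
  -- pointwise over the h_ window rows
  apply pvWMin_congr
  intro k hk
  have hkh : k < h_.toNat := by omega
  have hik : i + k < m.toNat := by omega
  rw [getD_map_range _ _ _ _ hik,
    pvSlide_eq _ n.toNat w hw _ hN,
    getD_map_range _ _ _ _ hj]
  unfold pvRowMin
  rw [min_segment _ (j : Int) w (by omega) hw
    (by rw [Int.toNat_natCast, hrowlen _ hik]; omega)]
  rw [Int.toNat_natCast]

-- ===== VERDICT (by name: the statement is the Claim_ definition above) =====
theorem solution_spec : Claim_equal_solution := by
  intro m n h_ w drops _hD hP
  obtain ⟨-, -, -, hB⟩ := hP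
  unfold Spec_solution solution solution_alt
  dsimp only
  rcases hB with ⟨hh, hw⟩ | hM | hN
  case inr.inl =>
    rw [show (m - h_ + 1).toNat = 0 from by omega]
    rfl
  case inr.inr =>
    rw [show (n - w + 1).toNat = 0 from by omega]
    simp only [List.range_zero, List.foldl_nil]
  apply congrArg Prod.snd
  refine foldl_congr_mem' _ _ _ _ ?_
  intro st i hiM
  refine foldl_congr_mem' _ _ _ _ ?_
  intro st' j hjN
  dsimp only
  rw [score_pointwise m n h_ w drops hh hw i j (List.mem_range.1 hiM) (List.mem_range.1 hjN)]
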